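-- pv_equiv track=rewrite | github.com/IgorTelles9/ufrj | COS110/exc7.py | verifica_igual
-- ===== SOURCE A (Python) =====
-- def verifica_igual(vetor_um, vetor_dois, i=0):
--     if vetor_um[i] == vetor_dois[i]:
--         return True
--     else:
--         tam_menor = min( len(vetor_um), len(vetor_dois) ) - 1
--         if i >= tam_menor:
--             return False
--
--         else:
--             return verifica_igual(vetor_um, vetor_dois, i+1)
-- ===== SOURCE B (Python) =====
-- def verifica_igual(vetor_um, vetor_dois, i=0):
--     tam_menor = min(len(vetor_um), len(vetor_dois)) - 1
--     while True:
--         if vetor_um[i] == vetor_dois[i]: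
--             return True
--         if i >= tam_menor:
--             return False
--         i += 1
-- ===== Notes on version B (the rewrite author's own statement) =====
-- stated objective: idiomatic
-- what changed: The tail recursion is rewritten as an explicit while-loop over the index with tam_menor hoisted out and computed once, avoiding per-call recomputation and Python's recursion depth limit.
import Mathlib
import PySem

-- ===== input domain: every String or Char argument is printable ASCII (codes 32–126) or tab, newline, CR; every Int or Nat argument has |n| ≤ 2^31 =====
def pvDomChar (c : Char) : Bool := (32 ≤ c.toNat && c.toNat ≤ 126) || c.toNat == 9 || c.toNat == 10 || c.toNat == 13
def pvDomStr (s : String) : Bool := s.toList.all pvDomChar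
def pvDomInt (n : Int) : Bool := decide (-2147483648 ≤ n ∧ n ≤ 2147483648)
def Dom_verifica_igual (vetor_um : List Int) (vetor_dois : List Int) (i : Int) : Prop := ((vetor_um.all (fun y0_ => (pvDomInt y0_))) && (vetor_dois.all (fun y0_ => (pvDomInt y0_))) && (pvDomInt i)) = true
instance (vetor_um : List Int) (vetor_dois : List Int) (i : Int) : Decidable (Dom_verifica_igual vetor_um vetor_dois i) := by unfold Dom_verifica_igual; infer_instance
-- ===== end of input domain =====

-- B replaces A's tail recursion by an explicit while-loop over the index with tam_menor hoisted out (idiomatic; same values everywhere A returns).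


-- ===== PORT A =====
-- Literal port of A's tail recursion; the `| _, _ => false` arm is the IndexError
-- case (excluded by Pre_verifica_igual).
def verifica_igual (vetor_um : List Int) (vetor_dois : List Int) (i : Int) : Bool :=
  match PySem.List.pyGet? vetor_um i, PySem.List.pyGet? vetor_dois i with
  | some a, some b =>
    if a = b then true
    else
      let tam_menor : Int := min (vetor_um.length : Int) (vetor_dois.length : Int) - 1
      if i ≥ tam_menor then false
      else verifica_igual vetor_um vetor_dois (i + 1)
  | _, _ => false
termination_by (min (vetor_um.length : Int) (vetor_dois.length : Int) - 1 - i).toNat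
decreasing_by omega

-- ===== PORT B =====
-- The `while True:` body of Source B, with tam_menor computed once; the `| _, _ => false`
-- arm is the IndexError case (excluded by Pre_verifica_igual).
def viLoop (vetor_um : List Int) (vetor_dois : List Int) (tam_menor : Int) (i : Int) : Bool :=
  match PySem.List.pyGet? vetor_um i with
  | none => false
  | some a =>
    match PySem.List.pyGet? vetor_dois i with
    | none => false
    | some b =>
      if a = b then true
      else if i ≥ tam_menor then false
      else viLoop vetor_um vetor_dois tam_menor (i + 1)
termination_by (tam_menor - i).toNat
decreasing_by omega

def verifica_igual_alt (vetor_um : List Int) (vetor_dois : List Int) (i : Int) : Bool :=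
  let tam_menor : Int := min (vetor_um.length : Int) (vetor_dois.length : Int) - 1
  viLoop vetor_um vetor_dois tam_menor i

-- ===== PRECONDITION & SPEC =====
-- Pre_ is exactly the set of inputs on which the Python A returns (elsewhere every
-- run reaches an index that is out of range for one of the lists and A raises
-- IndexError); it includes the negative start indices Python resolves by wraparound.
def Pre_verifica_igual (vetor_um : List Int) (vetor_dois : List Int) (i : Int) : Prop :=
  -(min (vetor_um.length : Int) (vetor_dois.length : Int)) ≤ i ∧
    i < min (vetor_um.length : Int) (vetor_dois.length : Int)
instance (vetor_um : List Int) (vetor_dois : List Int) (i : Int) : Decidable (Pre_verifica_igual vetor_um vetor_dois i) := by unfold Pre_verifica_igual; infer_instance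

def pvWitness_verifica_igual : List Int × List Int × Int := ([1, 2], [3, 2], 0)

def Spec_verifica_igual (vetor_um : List Int) (vetor_dois : List Int) (i : Int) (out : Bool) : Prop := out = verifica_igual_alt vetor_um vetor_dois i
instance (vetor_um : List Int) (vetor_dois : List Int) (i : Int) (out : Bool) : Decidable (Spec_verifica_igual vetor_um vetor_dois i out) := by unfold Spec_verifica_igual; infer_instance

-- ===== CLAIM (what is proved, stated in full; the proofs are below) =====
def Claim_equal_verifica_igual : Prop := ∀ (vetor_um : List Int) (vetor_dois : List Int) (i : Int), Dom_verifica_igual vetor_um vetor_dois i → Pre_verifica_igual vetor_um vetor_dois i → Spec_verifica_igual vetor_um vetor_dois i (verifica_igual vetor_um vetor_dois i)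

-- ===== LEMMAS AND PROOFS =====
-- A's recursion and B's loop unfold identically (A recomputes tam_menor each call,
-- B hoisted the same value), so they agree on ALL inputs, not just Pre_.
theorem verifica_igual_eq_loop (vetor_um vetor_dois : List Int) :
    ∀ (n : Nat) (i : Int),
      (min (vetor_um.length : Int) (vetor_dois.length : Int) - 1 - i).toNat = n →
      verifica_igual vetor_um vetor_dois i =
        viLoop vetor_um vetor_dois (min (vetor_um.length : Int) (vetor_dois.length : Int) - 1) i := by
  intro n
  induction n with
  | zero =>
    intro i hn
    rw [verifica_igual.eq_def, viLoop.eq_def]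
    rcases PySem.List.pyGet? vetor_um i with _ | a <;>
      rcases PySem.List.pyGet? vetor_dois i with _ | b <;> simp only []
    have : i ≥ min (vetor_um.length : Int) (vetor_dois.length : Int) - 1 := by omega
    simp [this]
  | succ k ih =>
    intro i hn
    rw [verifica_igual.eq_def, viLoop.eq_def]
    rcases PySem.List.pyGet? vetor_um i with _ | a <;>
      rcases PySem.List.pyGet? vetor_dois i with _ | b <;> simp only []
    by_cases hab : a = b
    · simp [hab]
    · simp only [hab, if_false]
      by_cases hi : i ≥ min (vetor_um.length : Int) (vetor_dois.length : Int) - 1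
      · simp [hi]
      · simp only [hi, if_false]
        exact ih (i + 1) (by omega)

-- ===== VERDICT (by name: the statement is the Claim_ definition above) =====
theorem verifica_igual_spec : Claim_equal_verifica_igual := by
  intro vetor_um vetor_dois i _ _
  unfold Spec_verifica_igual verifica_igual_alt
  exact verifica_igual_eq_loop vetor_um vetor_dois _ i rfl
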